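-- pv_equiv track=rewrite | github.com/kushkamisha/KPI-bachelor | Discrete-Math/Lab12/my_graph_module.py | distance_to_vertixes
-- ===== SOURCE A (Python) =====
-- def distance_to_vertixes(matr):
--     """ Calc distances to other vertixes for every vertex"""
--     n = len(matr)
--     distances = []
--
--     for k in range(n):
--         queue = []
--         black_list = []
--         path = {}
--         queue.append(k)
--         path[k] = 0
--
--         while len(queue) != 0:
--             parent = queue[0]
--             for child in range(n):
--                 if matr[parent][child] == 1 and not child in black_list:
--                     if not child in path:
--                         queue.append(child)
--                         path[child] = path[parent] + 1
--             black_list.append(parent)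
--             del queue[0]
--
--         del path[k]
--         distances.append(path)
--
--     return distances
-- ===== SOURCE B (Python) =====
-- def _bfs_levels(matr, n, k):
--     """Distances from k by level-synchronous BFS: frontier at depth d -> depth d+1.
--     n levels always suffice (eccentricity < n), so a bounded for-loop replaces the queue."""
--     dist = {}
--     frontier = [k]
--     for d in range(n):
--         nxt = []
--         for p in frontier:
--             for c in range(n):
--                 if matr[p][c] == 1 and c != k and c not in dist:
--                     dist[c] = d + 1
--                     nxt.append(c)
--         frontier = nxt
--     return dist
--
--
-- def distance_to_vertixes(matr):
--     """ Calc distances to other vertixes for every vertex"""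
--     n = len(matr)
--     return [_bfs_levels(matr, n, k) for k in range(n)]
-- ===== Notes on version B (the rewrite author's own statement) =====
-- stated objective: alternative
-- what changed: Replaces A's FIFO-queue BFS with per-element dequeue (del queue[0]), a black_list with a linear membership scan per edge, and a final del path[k], by a level-synchronous BFS: the whole frontier at depth d produces the frontier at depth d+1 in a bounded for-loop over n levels, with no queue mutation, no black_list and no deletion.
import Mathlib
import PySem

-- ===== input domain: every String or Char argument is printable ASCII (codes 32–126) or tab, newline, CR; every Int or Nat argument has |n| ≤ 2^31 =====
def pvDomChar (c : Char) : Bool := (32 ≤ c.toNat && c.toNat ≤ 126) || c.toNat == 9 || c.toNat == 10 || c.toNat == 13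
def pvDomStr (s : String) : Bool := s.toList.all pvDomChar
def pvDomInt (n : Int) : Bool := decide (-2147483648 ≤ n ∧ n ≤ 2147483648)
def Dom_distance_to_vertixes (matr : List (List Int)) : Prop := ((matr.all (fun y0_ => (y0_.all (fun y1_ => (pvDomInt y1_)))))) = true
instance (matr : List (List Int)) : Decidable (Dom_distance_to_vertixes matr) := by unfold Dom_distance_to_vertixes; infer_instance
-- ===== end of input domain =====

-- B replaces A's FIFO-queue BFS (per-element dequeue, black_list scans, final `del path[k]`) by a
-- level-synchronous BFS: frontier at depth d produces the frontier at depth d+1, over n levels;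
-- objective: alternative (no queue mutation, no black_list, no deletion).

-- ===== PORT A =====
-- matr[parent][child]: pyGetD is exact under Pre_ (square matrix, both indices always in range(n))
def pvEntry (matr : List (List Int)) (p c : Int) : Int :=
  PySem.List.pyGetD (PySem.List.pyGetD matr p []) c 0

-- the body of A's `for child in range(n)` loop, folded from state (queue, path);
-- path[parent] is always present, so getD is exact
def pvAStep (matr : List (List Int)) (n : Int) (bl : List Int) (parent : Int)
    (st : List Int × PySem.Dict Int Int) : List Int × PySem.Dict Int Int :=
  (PySem.List.pyRange 0 n 1).foldl (fun st child =>
    if pvEntry matr parent child = 1 ∧ bl.contains child = false then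
      if st.2.contains child = false then
        (st.1 ++ [child], st.2.insert child (st.2.getD parent 0 + 1))
      else st
    else st) st

-- A's `while len(queue) != 0` loop; one fuel unit per dequeue — matr.length + 1 is proved
-- sufficient below (every enqueued vertex is a distinct element of range(n))
def pvAWhile (matr : List (List Int)) (n : Int) :
    Nat → List Int → List Int → PySem.Dict Int Int → PySem.Dict Int Int
  | 0, _, _, path => path
  | _ + 1, [], _, path => path
  | fuel + 1, parent :: rest, bl, path =>
      let st := pvAStep matr n bl parent (parent :: rest, path)
      pvAWhile matr n fuel st.1.tail (bl ++ [parent]) st.2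

def distance_to_vertixes (matr : List (List Int)) : List (List (Int × Int)) :=
  let n : Int := matr.length
  (PySem.List.pyRange 0 n 1).foldl (fun distances k =>
    let path := pvAWhile matr n (matr.length + 1) [k] []
      ((PySem.Dict.empty).insert k 0)
    distances ++ [(path.erase k).items]) []

-- ===== PORT B =====
-- one iteration of B's `for d in range(n)` loop: state (frontier, dist) -> (next frontier, dist)
def pvBLevel (matr : List (List Int)) (n k : Int)
    (st : List Int × PySem.Dict Int Int) (d : Int) : List Int × PySem.Dict Int Int :=
  st.1.foldl (fun st2 p =>
    (PySem.List.pyRange 0 n 1).foldl (fun st3 c =>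
      if pvEntry matr p c = 1 ∧ c ≠ k ∧ st3.2.contains c = false then
        (st3.1 ++ [c], st3.2.insert c (d + 1))
      else st3) st2) ([], st.2)

def pvBfsLevels (matr : List (List Int)) (n k : Int) : PySem.Dict Int Int :=
  ((PySem.List.pyRange 0 n 1).foldl (pvBLevel matr n k) ([k], PySem.Dict.empty)).2

def distance_to_vertixes_alt (matr : List (List Int)) : List (List (Int × Int)) :=
  let n : Int := matr.length
  (PySem.List.pyRange 0 n 1).map (fun k => (pvBfsLevels matr n k).items)

-- ===== PRECONDITION & SPEC =====
-- Exactly the inputs on which A returns: every source k scans row k over range(n), so A raises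
-- IndexError iff some row is shorter than the matrix; longer (ragged) rows are fine.
def Pre_distance_to_vertixes (matr : List (List Int)) : Prop :=
  ∀ r ∈ matr, matr.length ≤ r.length

instance (matr : List (List Int)) : Decidable (Pre_distance_to_vertixes matr) := by
  unfold Pre_distance_to_vertixes; infer_instance

def pvWitness_distance_to_vertixes : List (List Int) := [[0, 1], [1, 0]]

def Spec_distance_to_vertixes (matr : List (List Int)) (out : List (List (Int × Int))) : Prop :=
  out = distance_to_vertixes_alt matr
instance (matr : List (List Int)) (out : List (List (Int × Int))) : Decidable (Spec_distance_to_vertixes matr out) := by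
  unfold Spec_distance_to_vertixes; infer_instance

-- ===== CLAIM (what is proved, stated in full; the proofs are below) =====
def Claim_equal_distance_to_vertixes : Prop := ∀ (matr : List (List Int)), Dom_distance_to_vertixes matr → Pre_distance_to_vertixes matr → Spec_distance_to_vertixes matr (distance_to_vertixes matr)

-- ===== LEMMAS AND PROOFS =====

-- A's path dict is always B's dist dict with (k, 0) in front
def pathOf (k : Int) (dist : PySem.Dict Int Int) : PySem.Dict Int Int :=
  ⟨(k, 0) :: dist.items⟩

lemma pv_contains_pathOf (k : Int) (dist : PySem.Dict Int Int) (x : Int) :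
    (pathOf k dist).contains x = ((k == x) || dist.contains x) := by
  simp [pathOf, PySem.Dict.contains]


lemma pv_contains_append_false {l m : List (Int × Int)} {x : Int}
    (h : (PySem.Dict.mk (l ++ m)).contains x = false) :
    (PySem.Dict.mk l).contains x = false := by
  simp only [PySem.Dict.contains, List.any_append, Bool.or_eq_false_iff] at h
  exact h.1

lemma pv_get?_mk_append_left {l m : List (Int × Int)} {x : Int} {v : Int}
    (h : (PySem.Dict.mk l).get? x = some v) :
    (PySem.Dict.mk (l ++ m)).get? x = some v := by
  simp only [PySem.Dict.get?, List.find?_append] at h ⊢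
  cases hf : List.find? (fun p => p.1 == x) l with
  | none => rw [hf] at h; simp at h
  | some p => rw [hf] at h; simpa using h

lemma pv_get?_mk_append_map {l : List (Int × Int)} {δ : List Int} {c : Int} (v : Int)
    (hl : (PySem.Dict.mk l).contains c = false) (hc : c ∈ δ) :
    (PySem.Dict.mk (l ++ δ.map (fun c => (c, v)))).get? c = some v := by
  have hnone : List.find? (fun p => p.1 == c) l = none := by
    rw [List.find?_eq_none]
    intro p hp hbe
    have : (PySem.Dict.mk l).contains c = true := by
      simp only [PySem.Dict.contains]
      exact List.any_eq_true.mpr ⟨p, hp, hbe⟩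
    rw [hl] at this; cases this
  simp only [PySem.Dict.get?, List.find?_append, hnone, Option.none_or]
  induction δ with
  | nil => cases hc
  | cons a δ ih =>
    by_cases hac : (a == c) = true
    · have : a = c := by simpa using hac
      subst this
      simp
    · have hmem : c ∈ δ := by
        rcases List.mem_cons.1 hc with rfl | h
        · simp at hac
        · exact h
      rw [List.map_cons, List.find?_cons_of_neg (by simpa using hac)]
      exact ih hmem

-- the inner `for child in range(n)` loops of A and of B march in lockstep
lemma pvInner (matr : List (List Int)) (k d parent : Int) (bl : List Int) :
  ∀ (L : List Int) (Q N : List Int) (dist : PySem.Dict Int Int),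
  (k :: dist.keys).Nodup →
  (pathOf k dist).get? parent = some d →
  (∀ x : Int, (pathOf k dist).contains x = false → bl.contains x = false) →
  ∃ δ : List Int,
    (L.foldl (fun st3 c =>
        if pvEntry matr parent c = 1 ∧ c ≠ k ∧ st3.2.contains c = false then
          (st3.1 ++ [c], st3.2.insert c (d + 1))
        else st3) (N, dist))
      = (N ++ δ, PySem.Dict.mk (dist.items ++ δ.map (fun c => (c, d + 1)))) ∧
    (L.foldl (fun st child =>
        if pvEntry matr parent child = 1 ∧ bl.contains child = false then
          if st.2.contains child = false then
            (st.1 ++ [child], st.2.insert child (st.2.getD parent 0 + 1))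
          else st
        else st) (Q, pathOf k dist))
      = (Q ++ δ, pathOf k (PySem.Dict.mk (dist.items ++ δ.map (fun c => (c, d + 1))))) ∧
    δ.Nodup ∧ (∀ c ∈ δ, c ∈ L ∧ c ≠ k ∧ dist.contains c = false) := by
  intro L
  induction L with
  | nil =>
    intro Q N dist hkeys hp hbl
    exact ⟨[], by simp, by simp [pathOf], List.nodup_nil, by simp⟩
  | cons c L ih =>
    intro Q N dist hkeys hp hbl
    by_cases he : pvEntry matr parent c = 1
    · by_cases hcd : ((k == c) || dist.contains c) = true
      · -- c is k or already discovered: both loops skip it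
        have hBcond : ¬ (pvEntry matr parent c = 1 ∧ c ≠ k ∧ dist.contains c = false) := by
          rintro ⟨-, hk1, hk2⟩
          rcases Bool.or_eq_true_iff.1 hcd with h | h
          · exact hk1 (eq_of_beq h).symm
          · rw [hk2] at h; cases h
        have hpc : (pathOf k dist).contains c = true := by
          rw [pv_contains_pathOf, hcd]
        obtain ⟨δ, e1, e2, nd, hmem⟩ := ih Q N dist hkeys hp hbl
        refine ⟨δ, ?_, ?_, nd, fun x hx => ⟨List.mem_cons_of_mem _ (hmem x hx).1,
          (hmem x hx).2.1, (hmem x hx).2.2⟩⟩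
        · rw [List.foldl_cons]
          have hstep : (if pvEntry matr parent c = 1 ∧ c ≠ k ∧ dist.contains c = false then
              (N ++ [c], dist.insert c (d + 1)) else (N, dist)) = (N, dist) := if_neg hBcond
          rw [hstep]; exact e1
        · rw [List.foldl_cons]
          have hstep : (if pvEntry matr parent c = 1 ∧ bl.contains c = false then
                if (pathOf k dist).contains c = false then
                  (Q ++ [c], (pathOf k dist).insert c ((pathOf k dist).getD parent 0 + 1))
                else (Q, pathOf k dist)
              else (Q, pathOf k dist)) = (Q, pathOf k dist) := by
            split_ifs with h1 h2
            · simp [hpc] at h2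
            · rfl
            · rfl
          rw [hstep]; exact e2
      · -- fresh child: both loops enqueue c with distance d+1
        have hor : ((k == c) || dist.contains c) = false := Bool.eq_false_iff.mpr hcd
        have hck : c ≠ k := by
          intro h; subst h; simp at hor
        have hdc : dist.contains c = false := (Bool.or_eq_false_iff.1 hor).2
        have hpathc : (pathOf k dist).contains c = false := by
          rw [pv_contains_pathOf, hor]
        have hblc : bl.contains c = false := hbl c hpathc
        have hckeys : c ∉ dist.keys := by
          intro h
          rw [(PySem.Dict.contains_iff_mem_keys dist c).2 h] at hdc; cases hdc
        have hval : (pathOf k dist).getD parent 0 = d :=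
          PySem.Dict.getD_of_get?_eq_some _ _ hp
        have hAins : (pathOf k dist).insert c ((pathOf k dist).getD parent 0 + 1)
            = pathOf k (PySem.Dict.mk (dist.items ++ [(c, d + 1)])) := by
          apply PySem.Dict.ext
          rw [hval, PySem.Dict.items_insert_of_not_contains _ _ hpathc]
          simp [pathOf]
        have hBins : dist.insert c (d + 1) = PySem.Dict.mk (dist.items ++ [(c, d + 1)]) := by
          apply PySem.Dict.ext
          rw [PySem.Dict.items_insert_of_not_contains _ _ hdc]
        have hkeys₁ : (k :: (PySem.Dict.mk (dist.items ++ [(c, d + 1)])).keys).Nodup := by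
          have hkeq : (PySem.Dict.mk (dist.items ++ [(c, d + 1)])).keys = dist.keys ++ [c] := by
            simp [PySem.Dict.keys]
          rw [hkeq, ← List.cons_append, List.nodup_append]
          refine ⟨hkeys, List.nodup_singleton _, ?_⟩
          intro x hx y hy
          have hyc : y = c := by simpa using hy
          subst hyc
          intro hxy
          subst hxy
          rcases List.mem_cons.1 hx with rfl | hx2
          · exact hck rfl
          · exact hckeys hx2
        have hp₁ : (pathOf k (PySem.Dict.mk (dist.items ++ [(c, d + 1)]))).get? parent = some d := by
          have := pv_get?_mk_append_left (m := [(c, d + 1)])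
            (show (PySem.Dict.mk ((k, 0) :: dist.items)).get? parent = some d from hp)
          simpa [pathOf] using this
        have hbl₁ : ∀ x : Int,
            (pathOf k (PySem.Dict.mk (dist.items ++ [(c, d + 1)]))).contains x = false →
            bl.contains x = false := by
          intro x hx
          apply hbl
          exact pv_contains_append_false
            (show (PySem.Dict.mk (((k, 0) :: dist.items) ++ [(c, d + 1)])).contains x = false by
              simpa [pathOf] using hx)
        obtain ⟨δ, e1, e2, nd, hmem⟩ :=
          ih (Q ++ [c]) (N ++ [c]) (PySem.Dict.mk (dist.items ++ [(c, d + 1)])) hkeys₁ hp₁ hbl₁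
        have hcnotδ : c ∉ δ := by
          intro h
          have := (hmem c h).2.2
          simp [PySem.Dict.contains, List.any_append] at this
        refine ⟨c :: δ, ?_, ?_, List.nodup_cons.2 ⟨hcnotδ, nd⟩, ?_⟩
        · rw [List.foldl_cons]
          have hstep : (if pvEntry matr parent c = 1 ∧ c ≠ k ∧ dist.contains c = false then
              (N ++ [c], dist.insert c (d + 1)) else (N, dist))
              = (N ++ [c], PySem.Dict.mk (dist.items ++ [(c, d + 1)])) := by
            rw [if_pos ⟨he, hck, hdc⟩, hBins]
          rw [hstep, e1]
          simp
        · rw [List.foldl_cons]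
          have hstep : (if pvEntry matr parent c = 1 ∧ bl.contains c = false then
                if (pathOf k dist).contains c = false then
                  (Q ++ [c], (pathOf k dist).insert c ((pathOf k dist).getD parent 0 + 1))
                else (Q, pathOf k dist)
              else (Q, pathOf k dist))
              = (Q ++ [c], pathOf k (PySem.Dict.mk (dist.items ++ [(c, d + 1)]))) := by
            rw [if_pos ⟨he, hblc⟩, if_pos hpathc, hAins]
          rw [hstep, e2]
          simp [pathOf]
        · intro x hx
          rcases List.mem_cons.1 hx with rfl | hx2
          · exact ⟨List.mem_cons_self, hck, hdc⟩
          · refine ⟨List.mem_cons_of_mem _ (hmem x hx2).1, (hmem x hx2).2.1, ?_⟩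
            exact pv_contains_append_false
              (show (PySem.Dict.mk (dist.items ++ [(c, d + 1)])).contains x = false from
                (hmem x hx2).2.2)
    · -- no edge: both loops skip
      obtain ⟨δ, e1, e2, nd, hmem⟩ := ih Q N dist hkeys hp hbl
      refine ⟨δ, ?_, ?_, nd, fun x hx => ⟨List.mem_cons_of_mem _ (hmem x hx).1,
        (hmem x hx).2.1, (hmem x hx).2.2⟩⟩
      · rw [List.foldl_cons]
        have hstep : (if pvEntry matr parent c = 1 ∧ c ≠ k ∧ dist.contains c = false then
            (N ++ [c], dist.insert c (d + 1)) else (N, dist)) = (N, dist) :=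
          if_neg (fun h => he h.1)
        rw [hstep]; exact e1
      · rw [List.foldl_cons]
        have hstep : (if pvEntry matr parent c = 1 ∧ bl.contains c = false then
              if (pathOf k dist).contains c = false then
                (Q ++ [c], (pathOf k dist).insert c ((pathOf k dist).getD parent 0 + 1))
              else (Q, pathOf k dist)
            else (Q, pathOf k dist)) = (Q, pathOf k dist) :=
          if_neg (fun h => he h.1)
        rw [hstep]; exact e2

lemma pv_contains_mk_append_map_self {l : List (Int × Int)} {δ : List Int} {v x : Int}
    (hx : x ∈ δ) :
    (PySem.Dict.mk (l ++ δ.map (fun c => (c, v)))).contains x = true := by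
  simp only [PySem.Dict.contains, List.any_append, Bool.or_eq_true_iff]
  right
  exact List.any_eq_true.mpr ⟨(x, v), List.mem_map.mpr ⟨x, hx, rfl⟩, by simp⟩

lemma pv_keys_append_nodup {k : Int} {dist : PySem.Dict Int Int} {δ : List Int} {v : Int}
    (hkeys : (k :: dist.keys).Nodup) (hδ : δ.Nodup)
    (hfresh : ∀ c ∈ δ, c ≠ k ∧ dist.contains c = false) :
    (k :: (PySem.Dict.mk (dist.items ++ δ.map (fun c => (c, v)))).keys).Nodup := by
  have hkeq : (PySem.Dict.mk (dist.items ++ δ.map (fun c => (c, v)))).keys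
      = dist.keys ++ δ := by
    simp [PySem.Dict.keys, Function.comp_def]
  rw [hkeq, ← List.cons_append, List.nodup_append]
  refine ⟨hkeys, hδ, ?_⟩
  intro x hx y hy hxy
  subst hxy
  rcases List.mem_cons.1 hx with rfl | hx2
  · exact (hfresh x hy).1 rfl
  · have := (hfresh x hy).2
    rw [(PySem.Dict.contains_iff_mem_keys dist x).2 hx2] at this
    cases this

-- one whole BFS level: A processes the frontier F one dequeue at a time,
-- B processes it in a single pvBLevel step; the results coincide
lemma pvSweep (matr : List (List Int)) (n k d : Int) :
  ∀ (F Q bl N : List Int) (dist : PySem.Dict Int Int),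
  (k :: dist.keys).Nodup →
  (∀ p ∈ F, (pathOf k dist).get? p = some d) →
  (∀ x : Int, (pathOf k dist).contains x = false → bl.contains x = false) →
  ∃ δ : List Int,
    (F.foldl (fun st2 p =>
      (PySem.List.pyRange 0 n 1).foldl (fun st3 c =>
        if pvEntry matr p c = 1 ∧ c ≠ k ∧ st3.2.contains c = false then
          (st3.1 ++ [c], st3.2.insert c (d + 1))
        else st3) st2) (N, dist))
      = (N ++ δ, PySem.Dict.mk (dist.items ++ δ.map (fun c => (c, d + 1)))) ∧
    (∀ fuel : Nat, F.length ≤ fuel →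
      pvAWhile matr n fuel (F ++ Q) bl (pathOf k dist)
        = pvAWhile matr n (fuel - F.length) (Q ++ δ) (bl ++ F)
            (pathOf k (PySem.Dict.mk (dist.items ++ δ.map (fun c => (c, d + 1)))))) ∧
    δ.Nodup ∧ (∀ c ∈ δ, c ∈ PySem.List.pyRange 0 n 1 ∧ c ≠ k ∧ dist.contains c = false) := by
  intro F
  induction F with
  | nil =>
    intro Q bl N dist hkeys hF hbl
    refine ⟨[], by simp, ?_, List.nodup_nil, by simp⟩
    intro fuel _
    simp
  | cons p F ihF =>
    intro Q bl N dist hkeys hF hbl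
    obtain ⟨δ₁, e1, e2, nd₁, hmem₁⟩ := pvInner matr k d p bl (PySem.List.pyRange 0 n 1)
      (p :: (F ++ Q)) N dist hkeys (hF p List.mem_cons_self) hbl
    have hkeys₁ := pv_keys_append_nodup (v := d + 1) hkeys nd₁
      (fun c hc => ⟨(hmem₁ c hc).2.1, (hmem₁ c hc).2.2⟩)
    have hF₁ : ∀ q ∈ F, (pathOf k (PySem.Dict.mk
        (dist.items ++ δ₁.map (fun c => (c, d + 1))))).get? q = some d := by
      intro q hq
      have := pv_get?_mk_append_left (m := δ₁.map (fun c => (c, d + 1)))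
        (show (PySem.Dict.mk ((k, 0) :: dist.items)).get? q = some d from
          hF q (List.mem_cons_of_mem _ hq))
      simpa [pathOf] using this
    have hbl₁ : ∀ x : Int, (pathOf k (PySem.Dict.mk
        (dist.items ++ δ₁.map (fun c => (c, d + 1))))).contains x = false →
        (bl ++ [p]).contains x = false := by
      intro x hx
      have hx' : (pathOf k dist).contains x = false :=
        pv_contains_append_false (show (PySem.Dict.mk
          (((k, 0) :: dist.items) ++ δ₁.map (fun c => (c, d + 1)))).contains x = false by
            simpa [pathOf] using hx)
      have hxp : x ≠ p := by
        intro h; subst h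
        have hc : (pathOf k dist).contains x = true := by
          rw [PySem.Dict.contains_eq_isSome_get?, hF x List.mem_cons_self]; rfl
        rw [hc] at hx'; cases hx'
      have h1 : bl.contains x = false := hbl x hx'
      simp only [List.contains_eq_mem, decide_eq_false_iff_not, List.mem_append,
        List.mem_singleton] at h1 ⊢
      rintro (h | h)
      · exact h1 h
      · exact hxp h
    obtain ⟨δ', e1', e2', nd', hmem'⟩ := ihF (Q ++ δ₁) (bl ++ [p]) (N ++ δ₁)
      (PySem.Dict.mk (dist.items ++ δ₁.map (fun c => (c, d + 1)))) hkeys₁ hF₁ hbl₁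
    refine ⟨δ₁ ++ δ', ?_, ?_, ?_, ?_⟩
    · rw [List.foldl_cons, e1, e1']
      simp
    · intro fuel hfl
      cases fuel with
      | zero => simp at hfl
      | succ f =>
        have hstep : pvAWhile matr n (f + 1) ((p :: F) ++ Q) bl (pathOf k dist)
            = pvAWhile matr n f
              (F ++ (Q ++ δ₁)) (bl ++ [p])
              (pathOf k (PySem.Dict.mk (dist.items ++ δ₁.map (fun c => (c, d + 1))))) := by
          rw [List.cons_append, pvAWhile]
          have hA : pvAStep matr n bl p (p :: (F ++ Q), pathOf k dist)
              = (p :: (F ++ Q) ++ δ₁,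
                  pathOf k (PySem.Dict.mk (dist.items ++ δ₁.map (fun c => (c, d + 1))))) := by
            unfold pvAStep
            exact e2
          rw [hA]
          simp [List.append_assoc]
        rw [hstep, e2' f (by simpa using hfl)]
        have harith : f - F.length = (f + 1) - (p :: F).length := by
          simp [Nat.succ_sub_succ]
        rw [harith]
        congr 1
        · simp [List.append_assoc]
        · simp [List.append_assoc]
        · simp [pathOf, List.append_assoc]
    · rw [List.nodup_append]
      refine ⟨nd₁, nd', ?_⟩
      intro x hx y hy hxy
      subst hxy
      have h1 := pv_contains_mk_append_map_self (l := dist.items) (v := d + 1) hx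
      have h2 := (hmem' x hy).2.2
      rw [h1] at h2; cases h2
    · intro c hc
      rcases List.mem_append.1 hc with h | h
      · exact hmem₁ c h
      · refine ⟨(hmem' c h).1, (hmem' c h).2.1, ?_⟩
        exact pv_contains_append_false
          (show (PySem.Dict.mk (dist.items ++ δ₁.map (fun c => (c, d + 1)))).contains c = false
            from (hmem' c h).2.2)

lemma pvStall (matr : List (List Int)) (n k : Int) (dist : PySem.Dict Int Int) :
  ∀ (L : List Int), L.foldl (pvBLevel matr n k) ([], dist) = ([], dist) := by
  intro L; induction L with
  | nil => rfl
  | cons d L ih => simpa [pvBLevel] using ih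

lemma pv_card_bound {k : Int} {dist : PySem.Dict Int Int} {N : Nat}
    (hkeys : (k :: dist.keys).Nodup)
    (hKmem : ∀ x ∈ k :: dist.keys, x ∈ PySem.List.pyRange 0 (N : Int) 1) :
    1 + dist.size ≤ N := by
  have h := (hkeys.subperm hKmem).length_le
  have hlen : (PySem.List.pyRange 0 (N : Int) 1).length = N := by
    simp [PySem.List.length_pyRange_one]
  rw [hlen, List.length_cons] at h
  have hsz : dist.keys.length = dist.size := List.length_map _
  omega

-- all levels together: A's while loop equals B's bounded level loop
lemma pvLevels (matr : List (List Int)) (k : Int) :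
  ∀ (m : Nat) (d : Int) (F bl : List Int) (dist : PySem.Dict Int Int) (fuel : Nat),
  d = (matr.length : Int) - m →
  (k :: dist.keys).Nodup →
  (∀ p ∈ F, (pathOf k dist).get? p = some d) →
  (∀ x : Int, (pathOf k dist).contains x = false → bl.contains x = false) →
  F.Nodup →
  (∀ x ∈ k :: dist.keys, x ∈ PySem.List.pyRange 0 (matr.length : Int) 1) →
  (∀ p ∈ F, p ∈ k :: dist.keys) →
  d + F.length ≤ (1 + dist.size : Int) →
  F.length + (matr.length - (1 + dist.size)) ≤ fuel →
  pvAWhile matr (matr.length : Int) fuel F bl (pathOf k dist)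
    = pathOf k (((PySem.List.pyRange d (matr.length : Int) 1).foldl
        (pvBLevel matr (matr.length : Int) k) (F, dist)).2)
  ∧ (k :: (((PySem.List.pyRange d (matr.length : Int) 1).foldl
        (pvBLevel matr (matr.length : Int) k) (F, dist)).2).keys).Nodup := by
  intro m
  induction m with
  | zero =>
    intro d F bl dist fuel hd hkeys hF hbl hFnd hKmem hFsub hsize hfuel
    have hd' : d = (matr.length : Int) := by simpa using hd
    have hrange : PySem.List.pyRange d (matr.length : Int) 1 = [] :=
      PySem.List.pyRange_one_eq_nil (le_of_eq hd'.symm)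
    have hbound := pv_card_bound (N := matr.length) hkeys hKmem
    have hFnil : F = [] := by
      have : F.length = 0 := by omega
      exact List.eq_nil_of_length_eq_zero this
    subst hFnil
    rw [hrange]
    exact ⟨by cases fuel <;> simp [pvAWhile], hkeys⟩
  | succ m ih =>
    intro d F bl dist fuel hd hkeys hF hbl hFnd hKmem hFsub hsize hfuel
    by_cases hF0 : F = []
    · subst hF0
      rw [pvStall]
      exact ⟨by cases fuel <;> simp [pvAWhile], hkeys⟩
    · have hFlen : 1 ≤ F.length := by
        cases F with
        | nil => exact absurd rfl hF0
        | cons a F => simp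
      have hbound := pv_card_bound (N := matr.length) hkeys hKmem
      have hdlt : d < (matr.length : Int) := by omega
      obtain ⟨δ, eB, eA, ndδ, hmemδ⟩ := pvSweep matr (matr.length : Int) k d F [] bl [] dist
        hkeys hF hbl
      have hBstep : pvBLevel matr (matr.length : Int) k (F, dist) d
          = (δ, PySem.Dict.mk (dist.items ++ δ.map (fun c => (c, d + 1)))) := by
        unfold pvBLevel
        simpa using eB
      have hfresh : ∀ c ∈ δ, c ≠ k ∧ dist.contains c = false :=
        fun c hc => ⟨(hmemδ c hc).2.1, (hmemδ c hc).2.2⟩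
      have hkeys₁ := pv_keys_append_nodup (v := d + 1) hkeys ndδ hfresh
      have hkeq : (PySem.Dict.mk (dist.items ++ δ.map (fun c => (c, d + 1)))).keys
          = dist.keys ++ δ := by
        simp [PySem.Dict.keys, Function.comp_def]
      have hF₁ : ∀ c ∈ δ, (pathOf k (PySem.Dict.mk
          (dist.items ++ δ.map (fun c => (c, d + 1))))).get? c = some (d + 1) := by
        intro c hc
        have hlc : (PySem.Dict.mk ((k, 0) :: dist.items)).contains c = false := by
          have h1 : (pathOf k dist).contains c = false := by
            rw [pv_contains_pathOf]
            have h2 : (k == c) = false := by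
              simp only [beq_eq_false_iff_ne, ne_eq]
              exact fun h => (hfresh c hc).1 h.symm
            rw [h2, (hfresh c hc).2]; rfl
          exact h1
        have := pv_get?_mk_append_map (d + 1) hlc hc
        simpa [pathOf] using this
      have hbl₁ : ∀ x : Int, (pathOf k (PySem.Dict.mk
          (dist.items ++ δ.map (fun c => (c, d + 1))))).contains x = false →
          (bl ++ F).contains x = false := by
        intro x hx
        have hx' : (pathOf k dist).contains x = false :=
          pv_contains_append_false (show (PySem.Dict.mk
            (((k, 0) :: dist.items) ++ δ.map (fun c => (c, d + 1)))).contains x = false by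
              simpa [pathOf] using hx)
        have hxF : x ∉ F := by
          intro h
          have hc : (pathOf k dist).contains x = true := by
            rw [PySem.Dict.contains_eq_isSome_get?, hF x h]; rfl
          rw [hc] at hx'; cases hx'
        have h1 : bl.contains x = false := hbl x hx'
        simp only [List.contains_eq_mem, decide_eq_false_iff_not, List.mem_append] at h1 ⊢
        rintro (h | h)
        · exact h1 h
        · exact hxF h
      have hKmem₁ : ∀ x ∈ k :: (PySem.Dict.mk
          (dist.items ++ δ.map (fun c => (c, d + 1)))).keys,
          x ∈ PySem.List.pyRange 0 (matr.length : Int) 1 := by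
        intro x hx
        rw [hkeq] at hx
        rcases List.mem_cons.1 hx with rfl | hx2
        · exact hKmem x List.mem_cons_self
        · rcases List.mem_append.1 hx2 with h | h
          · exact hKmem x (List.mem_cons_of_mem _ h)
          · exact (hmemδ x h).1
      have hFsub₁ : ∀ p ∈ δ, p ∈ k :: (PySem.Dict.mk
          (dist.items ++ δ.map (fun c => (c, d + 1)))).keys := by
        intro p hp
        rw [hkeq]
        exact List.mem_cons_of_mem _ (List.mem_append.2 (Or.inr hp))
      have hsize₁' : (PySem.Dict.mk (dist.items ++ δ.map (fun c => (c, d + 1)))).size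
          = dist.size + δ.length := by
        simp [PySem.Dict.size]
      have hbound₁ := pv_card_bound (N := matr.length) hkeys₁ hKmem₁
      have hfuelF : F.length ≤ fuel := by omega
      have ihres := ih (d + 1) δ (bl ++ F)
        (PySem.Dict.mk (dist.items ++ δ.map (fun c => (c, d + 1)))) (fuel - F.length)
        (by push_cast at hd ⊢; omega) hkeys₁ hF₁ hbl₁ ndδ hKmem₁ hFsub₁
        (by rw [hsize₁']; push_cast; omega)
        (by rw [hsize₁'] at hbound₁ ⊢; omega)
      rw [PySem.List.pyRange_one_cons hdlt, List.foldl_cons, hBstep]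
      refine ⟨?_, ihres.2⟩
      have eA' := eA fuel hfuelF
      rw [List.append_nil] at eA'
      rw [eA', List.nil_append]
      exact ihres.1

lemma pv_erase_pathOf {k : Int} {D : PySem.Dict Int Int} (hk : (k :: D.keys).Nodup) :
    (pathOf k D).erase k = D := by
  apply PySem.Dict.ext
  show List.filter (fun p => !p.1 == k) ((k, 0) :: D.items) = D.items
  rw [List.filter_cons]
  simp only [beq_self_eq_true, Bool.not_true, if_neg (by simp : ¬ (false = true))]
  apply List.filter_eq_self.mpr
  intro p hp
  have hmem : p.1 ∈ D.keys := List.mem_map.mpr ⟨p, hp, rfl⟩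
  have hne : p.1 ≠ k := fun h => (List.nodup_cons.1 hk).1 (h ▸ hmem)
  simp [hne]

-- ===== VERDICT (by name: the statement is the Claim_ definition above) =====
theorem distance_to_vertixes_spec : Claim_equal_distance_to_vertixes := by
  unfold Claim_equal_distance_to_vertixes
  intro matr _ _
  unfold Spec_distance_to_vertixes distance_to_vertixes distance_to_vertixes_alt
  simp only []
  rw [PySem.List.foldl_append_singleton_eq_map, List.nil_append]
  apply List.map_congr_left
  intro k hk
  have hk' : 0 ≤ k ∧ k < (matr.length : Int) := PySem.List.mem_pyRange_one.1 hk
  have hinit : (PySem.Dict.empty : PySem.Dict Int Int).insert k 0 = pathOf k PySem.Dict.empty := by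
    apply PySem.Dict.ext
    rw [PySem.Dict.items_insert_of_not_contains _ _ (by rfl)]
    rfl
  have hres := pvLevels matr k matr.length 0 [k] [] PySem.Dict.empty (matr.length + 1)
    (by simp)
    (by simp [PySem.Dict.keys, PySem.Dict.empty])
    (by
      intro p hp
      have : p = k := by simpa using hp
      subst this
      simp [pathOf, PySem.Dict.get?, PySem.Dict.empty])
    (by intro x _; rfl)
    (by simp)
    (by
      intro x hx
      have : x = k := by simpa [PySem.Dict.keys, PySem.Dict.empty] using hx
      subst this
      exact PySem.List.mem_pyRange_one.2 hk')
    (by intro p hp; simpa [PySem.Dict.keys, PySem.Dict.empty] using hp)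
    (by simp [PySem.Dict.size, PySem.Dict.empty])
    (by simp only [PySem.Dict.size, PySem.Dict.empty, List.length_singleton]; omega)
  rw [hinit, hres.1, pv_erase_pathOf hres.2]
  rfl
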